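-- pv_equiv track=rewrite | github.com/TMHSDigital/CFX-Developer-Tools | mcp-server/tools/docs_search.py | _list_summary
-- ===== SOURCE A (Python) =====
-- from collections import Counter
--
-- def _list_summary(pages: list[dict]) -> str:
--     """Return a summary of the documentation index."""
--     section_counts: Counter[str] = Counter()
--     for page in pages:
--         section_counts[page.get("section", "unknown")] += 1
--
--     lines = [f"Documentation index ({len(pages)} pages):\n"]
--     for sec, count in sorted(section_counts.items()):
--         lines.append(f"  {sec:24s} {count:>3d} pages")
--     lines.append("")
--     lines.append("Use section='scripting-manual' to browse a section, or provide a search query.")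
--     return "\n".join(lines)
-- ===== SOURCE B (Python) =====
-- def _list_summary(pages: list) -> str:
--     """Return a summary of the documentation index (sort-then-group instead of Counter)."""
--     secs = sorted(p.get("section", "unknown") for p in pages)
--     lines = [f"Documentation index ({len(pages)} pages):\n"]
--     i = 0
--     while i < len(secs):
--         j = i
--         while j < len(secs) and secs[j] == secs[i]:
--             j += 1
--         lines.append(f"  {secs[i]:24s} {j - i:>3d} pages")
--         i = j
--     lines.append("")
--     lines.append("Use section='scripting-manual' to browse a section, or provide a search query.")
--     return "\n".join(lines)
-- ===== Notes on version B (the rewrite author's own statement) =====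
-- stated objective: alternative
-- what changed: Replaces A's Counter-accumulation followed by sorting the (section,count) items with sorting the section names once and counting contiguous runs in a single linear scan over the sorted list.
import Mathlib
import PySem

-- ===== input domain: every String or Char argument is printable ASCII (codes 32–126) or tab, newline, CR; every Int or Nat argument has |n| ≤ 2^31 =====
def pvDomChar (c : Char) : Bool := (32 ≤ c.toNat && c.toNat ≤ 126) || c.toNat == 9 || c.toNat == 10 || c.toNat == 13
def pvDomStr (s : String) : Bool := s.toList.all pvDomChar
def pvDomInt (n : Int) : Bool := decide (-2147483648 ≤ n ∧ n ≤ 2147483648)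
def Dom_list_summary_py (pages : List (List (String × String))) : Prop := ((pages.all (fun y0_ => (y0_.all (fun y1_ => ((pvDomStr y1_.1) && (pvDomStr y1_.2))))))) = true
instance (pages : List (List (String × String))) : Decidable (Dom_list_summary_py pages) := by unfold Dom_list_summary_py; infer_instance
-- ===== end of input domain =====

-- B replaces A's Counter-then-sorted-items pass by sorting the section names once and
-- counting contiguous runs in a single scan (alternative decomposition, same output).

-- shared rendering helpers (identical dict lookup and f-strings in both Pythons)
def pvPageSec (page : List (String × String)) : String :=
  (PySem.Dict.mk page).getD "section" "unknown"

-- f"  {sec:24s} {count:>3d} pages"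
def pvFmtLine (sec : String) (count : Int) : String :=
  String.ofList ("  ".toList ++ sec.toList ++ List.replicate (24 - sec.toList.length) ' '
    ++ [' '] ++ List.replicate (3 - (PySem.Int.toStr count).toList.length) ' '
    ++ (PySem.Int.toStr count).toList ++ " pages".toList)

def pvHeader (n : Int) : String :=
  "Documentation index (" ++ PySem.Int.toStr n ++ " pages):\n"

def pvTrailer : String :=
  "Use section='scripting-manual' to browse a section, or provide a search query."

-- ===== PORT A =====
def list_summary_py (pages : List (List (String × String))) : String :=
  let sectionCounts : PySem.Dict String Int :=
    pages.foldl (fun d page => d.modify (pvPageSec page) 0 (· + 1)) PySem.Dict.empty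
  let lines : List String := [pvHeader (pages.length : Int)]
  let lines := (PySem.List.sorted2 sectionCounts.items (·.1) (·.2)).foldl
    (fun acc sc => acc ++ [pvFmtLine sc.1 sc.2]) lines
  let lines := lines ++ [""]
  let lines := lines ++ [pvTrailer]
  PySem.Str.join "\n" lines

-- ===== PORT B =====
-- B's while loop over the sorted list: each outer step consumes one maximal run
-- (the inner 'while secs[j] == secs[i]' is the takeWhile/dropWhile split)
def pvGroupLines : List String → List String
  | [] => []
  | a :: r =>
      pvFmtLine a (1 + ((r.takeWhile (· == a)).length : Int))
        :: pvGroupLines (r.dropWhile (· == a))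
  termination_by s => s.length
  decreasing_by simpa using Nat.lt_succ_of_le (List.length_dropWhile_le _ _)

def list_summary_py_alt (pages : List (List (String × String))) : String :=
  let secs := PySem.List.sorted (pages.map pvPageSec) (fun s => s) false
  PySem.Str.join "\n"
    ([pvHeader (pages.length : Int)] ++ pvGroupLines secs ++ [""] ++ [pvTrailer])

-- ===== PRECONDITION & SPEC =====
def Spec_list_summary_py (pages : List (List (String × String))) (out : String) : Prop := out = list_summary_py_alt pages
instance (pages : List (List (String × String))) (out : String) : Decidable (Spec_list_summary_py pages out) := by unfold Spec_list_summary_py; infer_instance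

-- ===== CLAIM (what is proved, stated in full; the proofs are below) =====
def Claim_equal_list_summary_py : Prop := ∀ (pages : List (List (String × String))), Dom_list_summary_py pages → Spec_list_summary_py pages (list_summary_py pages)

-- ===== LEMMAS AND PROOFS =====

-- the (section, run length) skeleton of pvGroupLines, used to relate it to the sorted Counter items
def pvPairs : List String → List (String × Int)
  | [] => []
  | a :: r =>
      (a, 1 + ((r.takeWhile (· == a)).length : Int)) :: pvPairs (r.dropWhile (· == a))
  termination_by s => s.length
  decreasing_by simpa using Nat.lt_succ_of_le (List.length_dropWhile_le _ _)

theorem pvGroupLines_eq_map (s : List String) :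
    pvGroupLines s = (pvPairs s).map (fun p => pvFmtLine p.1 p.2) := by
  induction s using pvPairs.induct with
  | case1 => rw [pvGroupLines, pvPairs]; rfl
  | case2 a r ih => rw [pvGroupLines, pvPairs, List.map_cons]; exact congrArg _ ih

-- insertBy only looks at 'before' on the inserted element vs the accumulator
theorem pvInsertBy_congr {α : Type} (f g : α → α → Bool) (x : α) (ys : List α)
    (h : ∀ y ∈ ys, f x y = g x y) :
    PySem.List.insertBy f x ys = PySem.List.insertBy g x ys := by
  induction ys with
  | nil => rfl
  | cons y ys ih =>
    simp only [PySem.List.insertBy, h y (List.mem_cons_self)]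
    split <;> simp [ih (fun z hz => h z (List.mem_cons_of_mem _ hz))]

theorem pvFoldl_insertBy_congr {α : Type} (f g : α → α → Bool) (S : List α)
    (h : ∀ a ∈ S, ∀ b ∈ S, f a b = g a b) :
    ∀ (xs acc : List α), (∀ a ∈ xs, a ∈ S) → (∀ a ∈ acc, a ∈ S) →
      xs.foldl (fun acc x => PySem.List.insertBy f x acc) acc
        = xs.foldl (fun acc x => PySem.List.insertBy g x acc) acc := by
  intro xs
  induction xs with
  | nil => intro acc _ _; rfl
  | cons x xs ih =>
    intro acc hxs hacc
    have hx : x ∈ S := hxs x (List.mem_cons_self)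
    simp only [List.foldl_cons]
    rw [pvInsertBy_congr f g x acc (fun y hy => h x hx y (hacc y hy))]
    exact ih _ (fun a ha => hxs a (List.mem_cons_of_mem _ ha))
      (fun a ha => by rcases (PySem.List.mem_insertBy g x a acc).1 ha with rfl | ha
                      · exact hx
                      · exact hacc a ha)

-- on a list whose first components determine the elements, Python's tuple sort is the fst-key sort
theorem pvSorted2_eq_sorted (xs : List (String × Int))
    (h : ∀ a ∈ xs, ∀ b ∈ xs, a.1 = b.1 → a = b) :
    PySem.List.sorted2 xs (·.1) (·.2) false = PySem.List.sorted xs (·.1) false := by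
  show xs.foldl (fun acc x => PySem.List.insertBy _ x acc) [] = _
  rw [PySem.List.sorted_eq_foldl_insertBy]
  apply pvFoldl_insertBy_congr _ _ xs _ xs [] (fun a ha => ha) (by simp)
  intro a ha b hb
  by_cases hab : a.1 = b.1
  · have : a = b := h a ha b hb hab
    subst this
    simp
  · rcases lt_or_gt_of_ne hab with hlt | hgt
    · simp [hlt, not_lt_of_gt hlt]
    · simp [hgt, not_lt_of_gt hgt]

theorem pvDiscard_of_not_mem (a : String) (s : PySem.Set String) (h : a ∉ s) :
    s.discard a = s := by
  simp only [PySem.Set.discard]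
  apply List.filter_eq_self.2
  intro y hy
  simp only [Bool.not_eq_eq_eq_not, Bool.not_true, beq_eq_false_iff_ne, ne_eq]
  rintro rfl; exact h hy

theorem pvDiscard_ofList_append (a : String) (grp rest : List String)
    (h : ∀ x ∈ grp, x = a) :
    (PySem.Set.ofList (grp ++ rest)).discard a = (PySem.Set.ofList rest).discard a := by
  induction grp with
  | nil => rfl
  | cons c t ih =>
    have hc := h c (List.mem_cons_self); subst hc
    rw [List.cons_append, PySem.Set.ofList_cons]
    have : (PySem.Set.ofList (t ++ rest)).discard c = (PySem.Set.ofList rest).discard c :=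
      ih (fun x hx => h x (List.mem_cons_of_mem _ hx))
    simp only [PySem.Set.discard] at this ⊢
    simp [List.filter_filter, this]

-- on a nondecreasing list, the run decomposition is exactly (first occurrences, multiplicities)
theorem pvPairs_sorted (s : List String) (hs : s.Pairwise (· ≤ ·)) :
    pvPairs s = (PySem.Set.ofList s).map (fun k => (k, (s.count k : Int))) := by
  induction s using pvPairs.induct with
  | case1 => rw [pvPairs]; rfl
  | case2 a r ih =>
    set grp := r.takeWhile (· == a) with hgrpdef
    set rest := r.dropWhile (· == a) with hrestdef
    have hsplit : r = grp ++ rest := (List.takeWhile_append_dropWhile).symm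
    have hgrp : ∀ x ∈ grp, x = a := by
      intro x hx
      have : (x == a) = true := by
        have := List.mem_takeWhile_imp (p := fun x => x == a) (l := r) (by simpa [hgrpdef] using hx)
        simpa using this
      exact eq_of_beq this
    have hrle : ∀ x ∈ r, a ≤ x := by
      intro x hx; exact (List.pairwise_cons.1 hs).1 x hx
    have hrest_pw : rest.Pairwise (· ≤ ·) := by
      have : r.Pairwise (· ≤ ·) := (List.pairwise_cons.1 hs).2
      rw [hsplit] at this
      exact (List.pairwise_append.1 this).2.1
    have hna : a ∉ rest := by
      intro hmem
      rcases hd : rest with _ | ⟨b, t⟩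
      · simp [hd] at hmem
      · have hb : ¬ (b == a) = true := by
          have := List.head_dropWhile_not (fun x => x == a) (l := r)
          rw [← hrestdef, hd] at this
          simpa using this (by simp)
        have hbne : b ≠ a := by simpa using hb
        have hab : a < b := lt_of_le_of_ne (hrle b (by rw [hsplit, hd]; simp)) (Ne.symm hbne)
        rw [hd] at hmem
        rcases List.mem_cons.1 hmem with rfl | hmt
        · exact hbne rfl
        · have hbt : b ≤ a := by
            rw [hd] at hrest_pw
            exact (List.pairwise_cons.1 hrest_pw).1 a hmt
          exact absurd (lt_of_lt_of_le hab hbt) (lt_irrefl a)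
    have hcount_a : ((a :: r).count a : Int) = 1 + (grp.length : Int) := by
      have h1 : grp.count a = grp.length := by
        rw [List.count_eq_length]; intro b hb; exact ((hgrp b hb).symm ▸ rfl)
      have h2 : rest.count a = 0 := List.count_eq_zero.2 hna
      rw [List.count_cons_self, hsplit, List.count_append, h1, h2]
      push_cast; ring
    have hcount_rest : ∀ k ∈ rest, ((a :: r).count k) = rest.count k := by
      intro k hk
      have hka : k ≠ a := fun h => hna (h ▸ hk)
      have h1 : grp.count k = 0 := List.count_eq_zero.2 (fun h => hka (hgrp k h))
      rw [hsplit]; simp [List.count_append, h1, Ne.symm hka]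
    have hset : PySem.Set.ofList (a :: r) = a :: PySem.Set.ofList rest := by
      rw [PySem.Set.ofList_cons, hsplit, pvDiscard_ofList_append a grp rest hgrp,
        pvDiscard_of_not_mem a _ (fun h => hna (by simpa using (PySem.Set.mem_ofList _ _).1 h))]
    rw [pvPairs, hset, List.map_cons, ih hrest_pw, hcount_a]
    congr 1
    apply List.map_congr_left
    intro k hk
    have : k ∈ rest := by simpa using (PySem.Set.mem_ofList _ _).1 hk
    rw [hcount_rest k this]

theorem pvOfList_sublist (s : List String) : (PySem.Set.ofList s).Sublist s := by
  induction s with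
  | nil => simp [PySem.Set.ofList]
  | cons x xs ih =>
    rw [PySem.Set.ofList_cons]
    exact List.Sublist.cons₂ x ((List.filter_sublist).trans ih)

theorem pvOfList_pairwise_lt (s : List String) (hs : s.Pairwise (· ≤ ·)) :
    (PySem.Set.ofList s).Pairwise (· < ·) := by
  have h1 : (PySem.Set.ofList s).Pairwise (· ≤ ·) := hs.sublist (pvOfList_sublist s)
  have h2 : (PySem.Set.ofList s).Nodup := PySem.Set.nodup_ofList s
  exact (h1.and h2).imp (fun {a b} hab => lt_of_le_of_ne hab.1 hab.2)

theorem pvMain (pages : List (List (String × String))) :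
    list_summary_py pages = list_summary_py_alt pages := by
  simp only [list_summary_py, list_summary_py_alt]
  set xs := pages.map pvPageSec with hxs
  set s := PySem.List.sorted xs (fun s => s) false with hsdef
  have hspw : s.Pairwise (· ≤ ·) := by
    simpa using PySem.List.sorted_pairwise xs (fun s => s)
  have hcounter : pages.foldl (fun d page => d.modify (pvPageSec page) 0 (· + 1)) PySem.Dict.empty
      = PySem.Dict.counter xs := by
    rw [PySem.Dict.counter_eq_foldl, hxs, List.foldl_map]
  have hitems : (PySem.Dict.counter xs).items
      = (PySem.Set.ofList xs).map (fun k => (k, (xs.count k : Int))) := by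
    simpa using PySem.Dict.items_counter xs
  have hdet : ∀ a ∈ (PySem.Dict.counter xs).items, ∀ b ∈ (PySem.Dict.counter xs).items,
      a.1 = b.1 → a = b := by
    rw [hitems]
    rintro a ha b hb hab
    simp only [List.mem_map] at ha hb
    obtain ⟨k, _, rfl⟩ := ha
    obtain ⟨k', _, rfl⟩ := hb
    simp only at hab
    subst hab
    rfl
  have hperm : (pvPairs s).Perm (PySem.Dict.counter xs).items := by
    rw [hitems, pvPairs_sorted s hspw]
    have hof : (PySem.Set.ofList s).Perm (PySem.Set.ofList xs) := by
      rw [List.perm_ext_iff_of_nodup (PySem.Set.nodup_ofList s) (PySem.Set.nodup_ofList xs)]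
      intro x
      rw [PySem.Set.mem_ofList, PySem.Set.mem_ofList, hsdef, PySem.List.mem_sorted]
    have hcnt : ∀ k ∈ PySem.Set.ofList s, ((s.count k : Int)) = (xs.count k : Int) := by
      intro k _
      have := (PySem.List.sorted_perm xs (fun s => s) false).count_eq k
      rw [hsdef]
      exact_mod_cast this
    rw [List.map_congr_left (fun k hk => by dsimp only; rw [hcnt k hk] :
      ∀ k ∈ PySem.Set.ofList s, (fun k => (k, (s.count k : Int))) k = (fun k => (k, (xs.count k : Int))) k)]
    exact hof.map _
  have hpw : (pvPairs s).Pairwise (fun p q => p.1 < q.1) := by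
    rw [pvPairs_sorted s hspw, List.pairwise_map]
    exact pvOfList_pairwise_lt s hspw
  have hsorted : PySem.List.sorted2 (PySem.Dict.counter xs).items (·.1) (·.2) false
      = pvPairs s := by
    rw [pvSorted2_eq_sorted _ hdet]
    exact PySem.List.sorted_eq_of_perm_of_pairwise_lt _ _ _ hperm hpw
  rw [hcounter, hsorted, PySem.List.foldl_append_singleton_eq_map
    (fun sc : String × Int => pvFmtLine sc.1 sc.2), pvGroupLines_eq_map]

-- ===== VERDICT (by name: the statement is the Claim_ definition above) =====
theorem list_summary_py_spec : Claim_equal_list_summary_py := by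
  intro pages _
  show list_summary_py pages = list_summary_py_alt pages
  exact pvMain pages
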